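-- pv_equiv track=rewrite | github.com/jvkersch/notebooks | pytorch-16s/cnn.py | to_categorical
-- ===== SOURCE A (Python) =====
-- def to_categorical(labels):
--     seen = {}
--     counter = 0
--     cat_labels = []
--     for label in labels:
--         if label not in seen:
--             seen[label] = counter
--             counter += 1
--         cat_labels.append(seen[label])
--
--     label_map = {id_: label for label, id_ in seen.items()}
--     return cat_labels, label_map
-- ===== SOURCE B (Python) =====
-- def to_categorical(labels):
--     labels = list(labels)
--     uniq = [lab for i, lab in enumerate(labels) if labels.index(lab) == i]
--     cat_labels = [uniq.index(lab) for lab in labels]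
--     label_map = dict(enumerate(uniq))
--     return cat_labels, label_map
-- ===== Notes on version B (the rewrite author's own statement) =====
-- stated objective: alternative
-- what changed: Drops A's hash map and counter entirely: B is purely positional, keeping a label as unique iff labels.index(lab) equals its position (first occurrence), encoding every label by a linear uniq.index scan, and building the map as dict(enumerate(uniq)) instead of inverting A's seen dict.
import Mathlib
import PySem

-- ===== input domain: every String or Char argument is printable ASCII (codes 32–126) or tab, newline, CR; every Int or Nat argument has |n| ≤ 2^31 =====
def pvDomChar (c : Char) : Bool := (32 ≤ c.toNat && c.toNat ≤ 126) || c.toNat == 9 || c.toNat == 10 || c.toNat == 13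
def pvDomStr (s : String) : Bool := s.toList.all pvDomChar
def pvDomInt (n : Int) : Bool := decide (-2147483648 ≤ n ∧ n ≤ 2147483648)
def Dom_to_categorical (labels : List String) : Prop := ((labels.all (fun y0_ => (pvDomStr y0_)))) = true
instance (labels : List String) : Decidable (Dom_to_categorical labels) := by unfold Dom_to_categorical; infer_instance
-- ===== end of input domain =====

-- B drops A's hash map and counter: it is purely positional — a label is unique iff
-- labels.index(lab) == its position, codes come from linear uniq.index scans, and the
-- map is dict(enumerate(uniq)); same values, no speed claim (objective: alternative).

-- ===== PORT A =====
-- 'seen[label]' always hits an existing key (inserted just above when fresh), so getD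
-- materialises the Python dict lookup exactly here.
def to_categorical (labels : List String) : List Int × (List (Int × String)) :=
  let st := labels.foldl
    (fun (st : PySem.Dict String Int × Int × List Int) label =>
      let seen := st.1
      let counter := st.2.1
      let cat := st.2.2
      let p := if seen.contains label then (seen, counter)
               else (seen.insert label counter, counter + 1)
      (p.1, p.2, cat ++ [p.1.getD label 0]))
    (PySem.Dict.empty, 0, [])
  let label_map := st.1.items.foldl
    (fun (d : PySem.Dict Int String) q => d.insert q.2 q.1) PySem.Dict.empty
  (st.2.2, label_map.items)

-- ===== PORT B =====
-- 'uniq.index(lab)' always succeeds (lab ∈ labels ⇒ lab ∈ uniq), so the getD 0 default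
-- is unreachable; dict(enumerate(uniq)) is the insert-fold over enumerate(uniq).
def to_categorical_alt (labels : List String) : List Int × (List (Int × String)) :=
  let uniq := ((PySem.List.enumerate labels 0).filter
      (fun p => (PySem.List.index? labels p.2).map (Nat.cast : Nat → Int) == some p.1)).map (·.2)
  let cat_labels := labels.map (fun lab =>
      ((PySem.List.index? uniq lab).map (Nat.cast : Nat → Int)).getD 0)
  let label_map := (PySem.List.enumerate uniq 0).foldl
      (fun (d : PySem.Dict Int String) p => d.insert p.1 p.2) PySem.Dict.empty
  (cat_labels, label_map.items)

-- ===== PRECONDITION & SPEC =====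
def Spec_to_categorical (labels : List String) (out : List Int × (List (Int × String))) : Prop := out = to_categorical_alt labels
instance (labels : List String) (out : List Int × (List (Int × String))) : Decidable (Spec_to_categorical labels out) := by unfold Spec_to_categorical; infer_instance

-- ===== CLAIM (what is proved, stated in full; the proofs are below) =====
def Claim_equal_to_categorical : Prop := ∀ (labels : List String), Dom_to_categorical labels → Spec_to_categorical labels (to_categorical labels)

-- ===== LEMMAS AND PROOFS =====

-- (label, id) pairs of A's 'seen' dict after processing l
def pvPairs (l : List String) : List (String × Int) :=
  (PySem.List.enumerate (PySem.List.dedup l) 0).map (fun p => (p.2, p.1))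

lemma pvKeys_pairs (l : List String) :
    (pvPairs l).map (·.1) = PySem.List.dedup l := by
  simp [pvPairs, Function.comp_def, PySem.List.map_snd_enumerate]

lemma pvContains_pairs (l : List String) (x : String) :
    (PySem.Dict.mk (pvPairs l)).contains x = decide (x ∈ l) := by
  rw [PySem.Dict.contains_eq_decide_mem_keys]
  simp only [PySem.Dict.keys, pvKeys_pairs]
  simp

lemma pvDedup_append_mem (l : List String) (x : String) (h : x ∈ l) :
    PySem.Set.ofList (l ++ [x]) = PySem.Set.ofList l := by
  rw [PySem.Set.ofList_append_singleton]
  exact PySem.Set.add_of_mem (by simpa [PySem.Set.mem_ofList] using h)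

lemma pvDedup_append_not_mem (l : List String) (x : String) (h : x ∉ l) :
    PySem.Set.ofList (l ++ [x]) = PySem.Set.ofList l ++ [x] := by
  rw [PySem.Set.ofList_append_singleton]
  exact PySem.Set.add_of_not_mem (by simpa [PySem.Set.mem_ofList] using h)

lemma pvPairs_append_not_mem (l : List String) (x : String) (h : x ∉ l) :
    pvPairs (l ++ [x]) = pvPairs l ++ [(x, ((PySem.List.dedup l).length : Int))] := by
  simp [pvPairs, pvDedup_append_not_mem l x h, PySem.List.enumerate_append,
        PySem.List.enumerate_cons]

-- A's loop computed in closed form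
lemma pvLoop_char (l : List String) :
    l.foldl
      (fun (st : PySem.Dict String Int × Int × List Int) label =>
        let seen := st.1
        let counter := st.2.1
        let cat := st.2.2
        let p := if seen.contains label then (seen, counter)
                 else (seen.insert label counter, counter + 1)
        (p.1, p.2, cat ++ [p.1.getD label 0]))
      (PySem.Dict.empty, 0, []) =
    (PySem.Dict.mk (pvPairs l), ((PySem.List.dedup l).length : Int),
     l.map (fun lab => (PySem.Dict.mk (pvPairs l)).getD lab 0)) := by
  induction l using List.reverseRecOn with
  | nil => rfl
  | append_singleton l x ih =>
    rw [List.foldl_append, ih]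
    by_cases hx : x ∈ l
    · have hdl : PySem.List.dedup (l ++ [x]) = PySem.List.dedup l := by
        simpa [PySem.List.dedup_eq_ofList] using pvDedup_append_mem l x hx
      have hpp : pvPairs (l ++ [x]) = pvPairs l := by
        simp [pvPairs, PySem.List.dedup_eq_ofList, pvDedup_append_mem l x hx]
      have hcon : (PySem.Dict.mk (pvPairs l)).contains x = true := by
        rw [pvContains_pairs]; simp [hx]
      simp only [List.foldl_cons, List.foldl_nil, hcon, if_true,
        hpp, hdl, List.map_append, List.map_cons, List.map_nil]
    · have hdl : PySem.List.dedup (l ++ [x]) = PySem.List.dedup l ++ [x] := by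
        simpa [PySem.List.dedup_eq_ofList] using pvDedup_append_not_mem l x hx
      have hfresh : (PySem.Dict.mk (pvPairs l)).contains x = false := by
        rw [pvContains_pairs]; simp [hx]
      have hins : (PySem.Dict.mk (pvPairs l)).insert x ((PySem.List.dedup l).length : Int)
          = PySem.Dict.mk (pvPairs (l ++ [x])) := by
        apply PySem.Dict.ext
        simp [PySem.Dict.items_insert, hfresh, pvPairs_append_not_mem l x hx]
      simp only [List.foldl_cons, List.foldl_nil, pvContains_pairs, hx, decide_false,
        Bool.false_eq_true, if_false, List.map_append, List.map_cons, List.map_nil]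
      rw [hins]
      refine Prod.ext rfl (Prod.ext ?_ ?_)
      · simp [PySem.List.dedup_eq_ofList, pvDedup_append_not_mem l x hx]
      · dsimp only
        congr 1
        apply List.map_congr_left
        intro lab hlab
        rw [← hins, PySem.Dict.getD_insert_of_ne]
        rintro rfl; exact hx hlab

-- B's first-occurrence filter IS the ordered dedup
lemma pvUniq_eq_dedup (l : List String) :
    ((PySem.List.enumerate l 0).filter
      (fun p => (PySem.List.index? l p.2).map (Nat.cast : Nat → Int) == some p.1)).map (·.2)
    = PySem.List.dedup l := by
  induction l using List.reverseRecOn with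
  | nil => rfl
  | append_singleton l x ih =>
    rw [PySem.List.enumerate_append, List.filter_append, List.map_append]
    have hpre : (PySem.List.enumerate l 0).filter
        (fun p => (PySem.List.index? (l ++ [x]) p.2).map (Nat.cast : Nat → Int) == some p.1)
        = (PySem.List.enumerate l 0).filter
        (fun p => (PySem.List.index? l p.2).map (Nat.cast : Nat → Int) == some p.1) := by
      apply List.filter_congr
      intro p hp
      have hmem : p.2 ∈ l := by
        have := PySem.List.map_snd_enumerate l (0 : Int)
        exact this ▸ List.mem_map_of_mem hp
      rw [PySem.List.index?_append_of_mem _ hmem]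
    rw [hpre, ih]
    by_cases hx : x ∈ l
    · obtain ⟨k, hk⟩ := Option.isSome_iff_exists.mp
        ((PySem.List.index?_isSome_iff l x).mpr hx)
      obtain ⟨hklt, -, -⟩ := PySem.List.getElem_of_index?_eq_some hk
      have hlast : ((PySem.List.index? (l ++ [x]) x).map (Nat.cast : Nat → Int)
          == some ((0 : Int) + l.length)) = false := by
        rw [PySem.List.index?_append_of_mem _ hx, hk]
        simp only [Option.map_some, beq_eq_false_iff_ne, ne_eq, Option.some.injEq]
        intro h; omega
      have hsing : List.filter
          (fun p => (PySem.List.index? (l ++ [x]) p.2).map (Nat.cast : Nat → Int) == some p.1)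
          (PySem.List.enumerate [x] ((0 : Int) + l.length)) = [] := by
        rw [PySem.List.enumerate_cons, PySem.List.enumerate_nil, List.filter_cons]
        simp only [hlast]
        simp
      rw [hsing]
      simp [PySem.List.dedup_eq_ofList, pvDedup_append_mem l x hx]
    · have hlast : ((PySem.List.index? (l ++ [x]) x).map (Nat.cast : Nat → Int)
          == some ((0 : Int) + l.length)) = true := by
        rw [PySem.List.index?_append_singleton_self l x hx]
        simp
      have hsing : List.filter
          (fun p => (PySem.List.index? (l ++ [x]) p.2).map (Nat.cast : Nat → Int) == some p.1)
          (PySem.List.enumerate [x] ((0 : Int) + l.length)) = [((0 : Int) + l.length, x)] := by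
        rw [PySem.List.enumerate_cons, PySem.List.enumerate_nil, List.filter_cons]
        simp only [hlast]
        simp
      rw [hsing]
      simp [PySem.List.dedup_eq_ofList, pvDedup_append_not_mem l x hx]

-- the dict lookup A performs equals the index?-scan B performs, on every label of l
lemma pvLookup (l : List String) (lab : String) (h : lab ∈ l) :
    (PySem.Dict.mk (pvPairs l)).getD lab 0
      = ((PySem.List.index? (PySem.List.dedup l) lab).map (Nat.cast : Nat → Int)).getD 0 := by
  have hmem : lab ∈ PySem.List.dedup l := (PySem.List.mem_dedup l lab).mpr h
  obtain ⟨k, hk⟩ := Option.isSome_iff_exists.mp ((PySem.List.index?_isSome_iff (PySem.List.dedup l) lab).mpr hmem)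
  obtain ⟨hklt, hget, -⟩ := PySem.List.getElem_of_index?_eq_some hk
  have henum : ((k : Int), lab) ∈ PySem.List.enumerate (PySem.List.dedup l) 0 := by
    rw [PySem.List.mem_enumerate_iff]
    exact ⟨k, hklt, by rw [hget]; simp⟩
  have hitem : (lab, (k : Int)) ∈ pvPairs l := List.mem_map_of_mem henum
  have hnd : (PySem.Dict.mk (pvPairs l)).keys.Nodup := by
    show ((pvPairs l).map (·.1)).Nodup
    rw [pvKeys_pairs]; exact PySem.List.nodup_dedup l
  rw [hk]
  exact PySem.Dict.getD_of_mem_items _ hitem hnd 0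

lemma pvNodup_fst_enumerate {α : Type} (xs : List α) (s : Int) :
    ((PySem.List.enumerate xs s).map (·.1)).Nodup := by
  have h2 : (List.map (fun p : Int × α => p.1) (PySem.List.enumerate xs s)).Pairwise
      (fun a b : Int => a < b) :=
    List.pairwise_map.mpr (PySem.List.pairwise_lt_enumerate xs s)
  exact h2.imp ne_of_lt

-- an insert-fold over distinct fresh keys is its own items list
lemma pvFold_items {κ ν : Type} [BEq κ] [LawfulBEq κ] (l : List (κ × ν)) (hnd : (l.map (·.1)).Nodup) :
    ((l.foldl (fun (d : PySem.Dict κ ν) p => d.insert p.1 p.2) PySem.Dict.empty)).items = l := by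
  have := PySem.Dict.items_foldl_insert_fresh (d := (PySem.Dict.empty : PySem.Dict κ ν))
      (l := l) (k := (·.1)) (v := (·.2)) (by intro a _; simp [PySem.Dict.contains_empty]) hnd
  simpa using this

-- ===== VERDICT (by name: the statement is the Claim_ definition above) =====
theorem to_categorical_spec : Claim_equal_to_categorical := by
  intro labels _
  unfold Spec_to_categorical to_categorical to_categorical_alt
  rw [pvLoop_char]
  dsimp only
  rw [pvUniq_eq_dedup]
  refine Prod.ext ?_ ?_
  · dsimp only
    exact List.map_congr_left (fun lab hlab => pvLookup labels lab hlab)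
  · -- label_map items on both sides are enumerate (dedup labels) 0
    have hA : ((pvPairs labels).foldl
        (fun (d : PySem.Dict Int String) q => d.insert q.2 q.1) PySem.Dict.empty).items
        = PySem.List.enumerate (PySem.List.dedup labels) 0 := by
      have h := pvFold_items ((pvPairs labels).map (fun q => (q.2, q.1)))
        (by simpa [pvPairs, Function.comp_def] using
          pvNodup_fst_enumerate (PySem.List.dedup labels) 0)
      simpa [pvPairs, List.foldl_map, List.map_map, Function.comp_def] using h
    have hB : ((PySem.List.enumerate (PySem.List.dedup labels) 0).foldl
        (fun (d : PySem.Dict Int String) p => d.insert p.1 p.2) PySem.Dict.empty).items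
        = PySem.List.enumerate (PySem.List.dedup labels) 0 := by
      have h := pvFold_items (PySem.List.enumerate (PySem.List.dedup labels) 0)
        (pvNodup_fst_enumerate _ _)
      simpa using h
    dsimp only
    rw [hA, hB]
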